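-- pv_equiv track=rewrite | github.com/genomicsengland/re01_ticket_trending | topic_model_classifier.py | get_assignee_role
-- ===== SOURCE A (Python) =====
-- def get_assignee_role(username, input_dict):
--
--     ''' Function to convert individual assignee information (usernames) to their role in the squad.
--         INPUT: Username, Dictionary of dict[job_role] = [list, of, usernames]
--         OUTPUT: Job role within the squad, or "outside_re1" if the username is not found in the dictionary.
--     '''
--
--     match = 0
--     for k, v in input_dict.items():
--         if username in v:
--             match += 1
--             return k
--     if match < 1:
--         return 'outside_re1'
-- ===== SOURCE B (Python) =====
-- def get_assignee_role(username, input_dict):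
--     ''' Reverse-index re-implementation: one pass builds username -> role
--         (first role wins via setdefault), then a single lookup. '''
--     rev = {}
--     for k, v in input_dict.items():
--         for u in v:
--             rev.setdefault(u, k)
--     return rev.get(username, 'outside_re1')
-- ===== Notes on version B (the rewrite author's own statement) =====
-- stated objective: alternative
-- what changed: Replaces the linear scan with early return by building a reverse username-to-role dictionary (setdefault keeps the first role, matching A's first-match order) followed by a single lookup; the dead 'match' counter is dropped.
import Mathlib
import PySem

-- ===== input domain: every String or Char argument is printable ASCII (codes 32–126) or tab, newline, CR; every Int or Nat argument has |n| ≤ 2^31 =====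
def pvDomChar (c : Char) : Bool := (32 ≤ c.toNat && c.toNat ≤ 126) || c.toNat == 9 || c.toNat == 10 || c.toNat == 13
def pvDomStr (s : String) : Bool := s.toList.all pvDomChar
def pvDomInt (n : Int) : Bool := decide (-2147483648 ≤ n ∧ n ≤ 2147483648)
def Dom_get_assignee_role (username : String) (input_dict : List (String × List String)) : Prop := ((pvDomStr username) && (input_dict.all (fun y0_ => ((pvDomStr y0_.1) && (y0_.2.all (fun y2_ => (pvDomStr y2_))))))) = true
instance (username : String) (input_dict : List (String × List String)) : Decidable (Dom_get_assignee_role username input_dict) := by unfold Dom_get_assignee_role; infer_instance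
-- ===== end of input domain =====

-- ===== PORT A =====
-- A scans the roles and returns the first whose list contains the username.
-- The loop with early return is transliterated as aLoop; A's 'match' counter is
-- dead (it is 0 whenever the loop ends normally), so the trailing 'if match < 1'
-- always fires there.
def aLoop (username : String) : List (String × List String) → Option String
  | [] => none
  | kv :: rest => if username ∈ kv.2 then some kv.1 else aLoop username rest

def get_assignee_role (username : String) (input_dict : List (String × List String)) : String :=
  match aLoop username input_dict with
  | some k => k
  | none => "outside_re1"

-- ===== PORT B =====
-- B builds a reverse dict username -> role with setdefault (first role wins),
-- then performs a single lookup.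
def get_assignee_role_alt (username : String) (input_dict : List (String × List String)) : String :=
  let rev := input_dict.foldl
    (fun d kv => kv.2.foldl (fun d u => d.setdefault u kv.1) d)
    PySem.Dict.empty
  rev.getD username "outside_re1"

-- ===== PRECONDITION & SPEC =====
def Spec_get_assignee_role (username : String) (input_dict : List (String × List String)) (out : String) : Prop := out = get_assignee_role_alt username input_dict
instance (username : String) (input_dict : List (String × List String)) (out : String) : Decidable (Spec_get_assignee_role username input_dict out) := by unfold Spec_get_assignee_role; infer_instance

-- ===== CLAIM (what is proved, stated in full; the proofs are below) =====
def Claim_equal_get_assignee_role : Prop := ∀ (username : String) (input_dict : List (String × List String)), Dom_get_assignee_role username input_dict → Spec_get_assignee_role username input_dict (get_assignee_role username input_dict)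

-- ===== LEMMAS AND PROOFS =====

-- lookup after the inner setdefault loop: existing bindings win, otherwise the
-- role k is bound exactly when x occurs in v
theorem get?_setdefault_foldl (k x : String) :
    ∀ (v : List String) (d : PySem.Dict String String),
      (v.foldl (fun d u => d.setdefault u k) d).get? x
        = (d.get? x).or (if x ∈ v then some k else none)
  | [], d => by simp
  | u :: v, d => by
    simp only [List.foldl_cons]
    rw [get?_setdefault_foldl k x v]
    by_cases hc : d.contains u
    · rw [PySem.Dict.setdefault_of_contains d k hc]
      by_cases hx : x = u
      · subst hx
        rw [PySem.Dict.contains_eq_isSome_get?] at hc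
        obtain ⟨s, hs⟩ := Option.isSome_iff_exists.mp hc
        simp [hs]
      · simp [List.mem_cons, hx]
    · rw [PySem.Dict.setdefault_of_not_contains d k (Bool.not_eq_true _ ▸ hc)]
      by_cases hx : x = u
      · subst hx
        have hn : d.get? x = none := by
          rw [PySem.Dict.contains_eq_isSome_get?] at hc
          simpa using hc
        simp [hn]
      · rw [PySem.Dict.get?_insert]
        simp [List.mem_cons, hx]

-- lookup after the whole reverse-building loop equals A's first-match scan,
-- modulo bindings already present in d
theorem get?_rev_foldl (x : String) :
    ∀ (l : List (String × List String)) (d : PySem.Dict String String),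
      (l.foldl (fun d kv => kv.2.foldl (fun d u => d.setdefault u kv.1) d) d).get? x
        = (d.get? x).or (aLoop x l)
  | [], d => by simp [aLoop]
  | kv :: l, d => by
    simp only [List.foldl_cons]
    rw [get?_rev_foldl x l, get?_setdefault_foldl]
    cases h : d.get? x <;> simp [aLoop] <;> (split <;> simp)

-- ===== VERDICT (by name: the statement is the Claim_ definition above) =====
theorem get_assignee_role_spec : Claim_equal_get_assignee_role := by
  intro username input_dict _
  unfold Spec_get_assignee_role get_assignee_role get_assignee_role_alt
  rw [PySem.Dict.getD_eq_get?_getD, get?_rev_foldl]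
  simp only [PySem.Dict.get?_empty, Option.none_or]
  cases aLoop username input_dict <;> rfl
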